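-- pv_equiv track=rewrite | github.com/kitizz/tree_edit_distance | pq_grams.py | count_bag_intersection
-- ===== SOURCE A (Python) =====
-- from collections.abc import Sequence
-- from typing import TypeAlias
--
-- PQGram: TypeAlias = tuple[str, ...]
--
-- def count_bag_intersection(a: Sequence[PQGram], b: Sequence[PQGram]) -> int:
--     """
--     Requires:
--     - a and b have sortable elements
--     - a and b are both sorted
--     """
--     num_intersections = 0
--     index_a = 0
--     index_b = 0
--     while index_a < len(a) and index_b < len(b):
--         a_val = a[index_a]
--         b_val = b[index_b]
--
--         if a_val == b_val:
--             num_intersections += 1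
--             index_a += 1
--             index_b += 1
--             continue
--
--         if a_val < b_val:
--             index_a += 1
--             continue
--
--         if b_val < a_val:
--             index_b += 1
--             continue
--
--     return num_intersections
-- ===== SOURCE B (Python) =====
-- def count_bag_intersection(a, b):
--     """Multiset-intersection size via count dictionaries; does not need a, b sorted."""
--     count_a = {}
--     for g in a:
--         k = tuple(g)
--         count_a[k] = count_a.get(k, 0) + 1
--     count_b = {}
--     for g in b:
--         k = tuple(g)
--         count_b[k] = count_b.get(k, 0) + 1
--     return sum(min(c, count_b.get(k, 0)) for k, c in count_a.items())
-- ===== Notes on version B (the rewrite author's own statement) =====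
-- stated objective: alternative
-- what changed: Replaces the sorted two-pointer merge with a hash-based multiset intersection: build count dictionaries for both sequences and sum the per-key minima, so B no longer depends on the inputs being sorted.
-- outside the precondition, e.g. on count_bag_intersection([('b',), ('a',)], [('a',)]): A returns 0, B returns 1
import Mathlib
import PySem

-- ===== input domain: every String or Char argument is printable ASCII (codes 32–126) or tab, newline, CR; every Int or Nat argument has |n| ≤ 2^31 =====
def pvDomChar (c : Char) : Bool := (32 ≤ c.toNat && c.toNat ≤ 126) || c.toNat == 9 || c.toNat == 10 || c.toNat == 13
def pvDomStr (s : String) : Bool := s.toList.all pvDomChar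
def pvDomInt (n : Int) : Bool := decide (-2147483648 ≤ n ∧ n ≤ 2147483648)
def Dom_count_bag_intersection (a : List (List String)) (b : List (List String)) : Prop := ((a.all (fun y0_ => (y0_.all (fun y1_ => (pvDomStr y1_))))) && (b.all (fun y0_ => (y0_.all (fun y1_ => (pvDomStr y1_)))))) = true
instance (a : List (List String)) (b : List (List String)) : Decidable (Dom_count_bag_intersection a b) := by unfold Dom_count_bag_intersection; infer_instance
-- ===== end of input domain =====

-- B replaces A's sorted two-pointer merge by count dictionaries summed per-key minima (alternative
-- algorithm, same asymptotic cost); equivalence is claimed on sorted inputs, A's documented domain.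


-- ===== PORT A =====
-- Python tuple-of-str comparison: lexicographic over strings, strings compared by code point;
-- exact as '<' on the lists of char lists (PYSEM.md: Python str '<' is Lean '<' on s.toList).
def pvKey (x : List String) : List (List Char) := x.map String.toList

def pvTupLt (x y : List String) : Bool := decide (pvKey x < pvKey y)

-- the while loop of A, one call per iteration; state = (index_a, index_b, num_intersections)
def pvCbiLoop (a b : List (List String)) (ia ib : Nat) (acc : Int) : Int :=
  if h : ia < a.length ∧ ib < b.length then
    let a_val := a[ia]'h.1
    let b_val := b[ib]'h.2
    if a_val = b_val then pvCbiLoop a b (ia + 1) (ib + 1) (acc + 1)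
    else if pvTupLt a_val b_val then pvCbiLoop a b (ia + 1) ib acc
    else
      -- Python here tests 'if b_val < a_val'; by trichotomy of tuple comparison this test is
      -- always true in this branch (otherwise Python would loop forever), so it is elided
      pvCbiLoop a b ia (ib + 1) acc
  else acc
termination_by (a.length - ia) + (b.length - ib)
decreasing_by all_goals omega

def count_bag_intersection (a : List (List String)) (b : List (List String)) : Int :=
  pvCbiLoop a b 0 0 0

-- ===== PORT B =====
def count_bag_intersection_alt (a : List (List String)) (b : List (List String)) : Int :=
  let count_a := a.foldl (fun d g => d.insert g (d.getD g 0 + 1)) PySem.Dict.empty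
  let count_b := b.foldl (fun d g => d.insert g (d.getD g 0 + 1)) PySem.Dict.empty
  count_a.items.foldl (fun s p => s + min p.2 (count_b.getD p.1 0)) 0

-- ===== PRECONDITION & SPEC =====
-- A's docstring requires both sequences to be sorted: on unsorted inputs that share an element,
-- A's merge walk can return an accidental undercount of the intersection, and exactly those inputs
-- are excluded; Pre_ admits the documented (sorted) inputs plus all pairs with no common element,
-- on which element order cannot matter.
def Pre_count_bag_intersection (a : List (List String)) (b : List (List String)) : Prop :=
  (a.Pairwise (fun x y => pvKey x ≤ pvKey y) ∧ b.Pairwise (fun x y => pvKey x ≤ pvKey y))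
    ∨ (∀ x ∈ a, x ∉ b)

instance (a : List (List String)) (b : List (List String)) : Decidable (Pre_count_bag_intersection a b) := by
  unfold Pre_count_bag_intersection; infer_instance

def pvWitness_count_bag_intersection : List (List String) × List (List String) :=
  ([["a"], ["a", "b"]], [["a", "b"], ["c"]])

def Spec_count_bag_intersection (a : List (List String)) (b : List (List String)) (out : Int) : Prop := out = count_bag_intersection_alt a b
instance (a : List (List String)) (b : List (List String)) (out : Int) : Decidable (Spec_count_bag_intersection a b out) := by unfold Spec_count_bag_intersection; infer_instance

-- ===== CLAIM (what is proved, stated in full; the proofs are below) =====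
def Claim_equal_count_bag_intersection : Prop := ∀ (a : List (List String)) (b : List (List String)), Dom_count_bag_intersection a b → Pre_count_bag_intersection a b → Spec_count_bag_intersection a b (count_bag_intersection a b)

-- ===== LEMMAS AND PROOFS =====

-- A's loop as structural recursion on the two suffixes
def pvMerge : List (List String) → List (List String) → Int
  | [], _ => 0
  | _ :: _, [] => 0
  | x :: xs, y :: ys =>
    if x = y then pvMerge xs ys + 1
    else if pvTupLt x y then pvMerge xs (y :: ys)
    else pvMerge (x :: xs) ys
termination_by a b => a.length + b.length
decreasing_by all_goals (simp; try omega)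

theorem pvKey_inj : Function.Injective pvKey := by
  intro x y h
  exact List.map_injective_iff.mpr (fun s t hst => String.ext hst) h

theorem pvCbiLoop_eq_merge (a b : List (List String)) (ia ib : Nat) (acc : Int) :
    pvCbiLoop a b ia ib acc = acc + pvMerge (a.drop ia) (b.drop ib) := by
  fun_induction pvCbiLoop a b ia ib acc with
  | case1 ia ib acc h av bv heq ih =>
      rw [ih, List.drop_eq_getElem_cons h.1, List.drop_eq_getElem_cons h.2]
      simp only [pvMerge]
      rw [if_pos heq]
      ring
  | case2 ia ib acc h av bv hne hlt ih =>
      rw [ih, List.drop_eq_getElem_cons h.1, List.drop_eq_getElem_cons h.2]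
      simp only [pvMerge]
      rw [if_neg hne, if_pos hlt]
  | case3 ia ib acc h av bv hne hnlt ih =>
      rw [ih, List.drop_eq_getElem_cons h.1, List.drop_eq_getElem_cons h.2]
      simp only [pvMerge]
      rw [if_neg hne, if_neg hnlt]
  | case4 ia ib acc h =>
      rcases Nat.lt_or_ge ia a.length with hia | hia
      · have hib : b.length ≤ ib := by omega
        rw [List.drop_eq_nil_iff.mpr hib]
        cases List.drop ia a <;> simp [pvMerge]
      · rw [List.drop_eq_nil_iff.mpr hia]
        simp [pvMerge]

theorem merge_eq_inter : ∀ (a b : List (List String)),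
    a.Pairwise (fun x y => pvKey x ≤ pvKey y) →
    b.Pairwise (fun x y => pvKey x ≤ pvKey y) →
    pvMerge a b = (((a : Multiset (List String)) ∩ (b : Multiset (List String))).card : Int) := by
  intro a b
  induction a, b using pvMerge.induct with
  | case1 b => intro _ _; simp [pvMerge]
  | case2 x xs => intro _ _; simp [pvMerge]
  | case3 xs y ys ih =>
      intro ha hb
      have hx : y ∈ ((y :: ys : List (List String)) : Multiset (List String)) := by simp
      rw [pvMerge, if_pos rfl, ih (List.pairwise_cons.mp ha).2 (List.pairwise_cons.mp hb).2]
      rw [← Multiset.cons_coe y xs, Multiset.cons_inter_of_pos _ hx,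
        ← Multiset.cons_coe y ys, Multiset.erase_cons_head]
      simp
  | case4 x xs y ys hne hlt ih =>
      intro ha hb
      have hxlt : pvKey x < pvKey y := of_decide_eq_true hlt
      have hxmem : x ∉ ((y :: ys : List (List String)) : Multiset (List String)) := by
        intro hmem
        rcases List.mem_cons.mp (by simpa using hmem) with h | h
        · exact hne h
        · exact absurd (lt_of_lt_of_le hxlt ((List.pairwise_cons.mp hb).1 x h)) (lt_irrefl _)
      rw [pvMerge, if_neg hne, if_pos hlt, ih (List.pairwise_cons.mp ha).2 hb]
      rw [← Multiset.cons_coe x xs, Multiset.cons_inter_of_neg _ hxmem]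
  | case5 x xs y ys hne hnlt ih =>
      intro ha hb
      have hylt : pvKey y < pvKey x := by
        rcases lt_trichotomy (pvKey x) (pvKey y) with h | h | h
        · exact absurd (decide_eq_true h) hnlt
        · exact absurd (pvKey_inj h) hne
        · exact h
      have hymem : y ∉ ((x :: xs : List (List String)) : Multiset (List String)) := by
        intro hmem
        rcases List.mem_cons.mp (by simpa using hmem) with h | h
        · exact hne h.symm
        · exact absurd hylt (not_lt.mpr ((List.pairwise_cons.mp ha).1 y h))
      rw [pvMerge, if_neg hne, if_neg hnlt, ih ha (List.pairwise_cons.mp hb).2]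
      have h2 : ((x :: xs : List (List String)) : Multiset (List String)) ∩ ↑(y :: ys)
          = (↑(x :: xs) : Multiset (List String)) ∩ ↑ys := by
        rw [Multiset.inter_comm, ← Multiset.cons_coe y ys, Multiset.cons_inter_of_neg _ hymem,
          Multiset.inter_comm]
      rw [h2]

theorem pvCountCongr {α : Type} [DecidableEq α] [inst : BEq α] [LawfulBEq α] (k : α) (l : List α) :
    @List.count α inst k l = @List.count α instBEqOfDecidableEq k l := by
  have h1 : @List.count α inst k l = List.countP (fun y => y == k) l := rfl
  have h2 : @List.count α instBEqOfDecidableEq k l = List.countP (fun y => decide (y = k)) l := rfl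
  rw [h1, h2]
  exact List.countP_congr (fun x _ => by simp)

theorem alt_eq_inter (a b : List (List String)) :
    count_bag_intersection_alt a b
      = (((a : Multiset (List String)) ∩ (b : Multiset (List String))).card : Int) := by
  show (PySem.Dict.counter a).items.foldl
      (fun s p => s + min p.2 ((PySem.Dict.counter b).getD p.1 0)) 0
      = (((a : Multiset (List String)) ∩ (b : Multiset (List String))).card : Int)
  rw [PySem.Dict.items_counter, PySem.List.foldl_add]
  simp only [List.map_map, Function.comp_def, PySem.Dict.getD_counter]
  -- Σ over the distinct elements of a of min(count in a, count in b) = card of the multiset inter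
  rw [← List.sum_toFinset _ (PySem.Set.nodup_ofList a)]
  have hfin : (PySem.Set.ofList a).toFinset = a.toFinset := by
    ext x; simp [List.mem_toFinset, PySem.Set.mem_ofList]
  rw [hfin]
  have hcard : ((a : Multiset (List String)) ∩ (b : Multiset (List String))).card
      = ∑ k ∈ a.toFinset, min (a.count k) (b.count k) := by
    rw [← Multiset.toFinset_sum_count_eq ((a : Multiset (List String)) ∩ (b : Multiset (List String)))]
    rw [Finset.sum_subset (by
      intro x hx
      rw [Multiset.mem_toFinset] at hx
      rw [List.mem_toFinset]
      simpa using (Multiset.mem_inter.mp hx).1)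
      (by
      intro x _ hnx
      rw [Multiset.mem_toFinset] at hnx
      exact Multiset.count_eq_zero.mpr hnx)]
    refine Finset.sum_congr rfl ?_
    intro k _
    rw [Multiset.count_inter, Multiset.coe_count, Multiset.coe_count, ← pvCountCongr k a, ← pvCountCongr k b]
  rw [hcard]
  push_cast
  simp

theorem merge_disjoint : ∀ (a b : List (List String)), (∀ x ∈ a, x ∉ b) → pvMerge a b = 0 := by
  intro a b
  induction a, b using pvMerge.induct with
  | case1 b => intro _; simp [pvMerge]
  | case2 x xs => intro _; simp [pvMerge]
  | case3 xs y ys ih =>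
      intro h
      exact absurd (List.mem_cons_self) (h y List.mem_cons_self)
  | case4 x xs y ys hne hlt ih =>
      intro h
      rw [pvMerge, if_neg hne, if_pos hlt]
      exact ih (fun z hz => h z (List.mem_cons_of_mem _ hz))
  | case5 x xs y ys hne hnlt ih =>
      intro h
      rw [pvMerge, if_neg hne, if_neg hnlt]
      exact ih (fun z hz hzys => h z hz (List.mem_cons_of_mem _ hzys))

theorem inter_card_zero_of_disjoint (a b : List (List String)) (h : ∀ x ∈ a, x ∉ b) :
    ((a : Multiset (List String)) ∩ (b : Multiset (List String))) = 0 := by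
  refine Multiset.eq_zero_of_forall_notMem (fun x hx => ?_)
  have hm := Multiset.mem_inter.mp hx
  exact h x (by simpa using hm.1) (by simpa using hm.2)

-- ===== VERDICT (by name: the statement is the Claim_ definition above) =====
theorem count_bag_intersection_spec : Claim_equal_count_bag_intersection := by
  intro a b _ hpre
  unfold Spec_count_bag_intersection count_bag_intersection
  rw [pvCbiLoop_eq_merge, alt_eq_inter]
  rcases hpre with ⟨ha, hb⟩ | hdisj
  · simpa using merge_eq_inter a b ha hb
  · rw [inter_card_zero_of_disjoint a b hdisj]
    simpa using merge_disjoint a b hdisj
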